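-- pv_equiv track=rewrite | github.com/RussellDash332/kattis | src/Rainbow Numbers/rainbownumbers.py | f
-- ===== SOURCE A (Python) =====
-- m = 998244353
--
-- def f(x):
--     n = len(x)
--     def bt(pos, prev, tie):
--         if pos == n: return 1
--         if tie: return pow(9, n-pos, m)
--         s = 0
--         for u in range(x[pos]):
--             if u == prev: continue
--             s += bt(pos+1, u, 1)
--         if x[pos] != prev: s += bt(pos+1, x[pos], 0)
--         return s%m
--     return bt(0, -1, 0)%m
-- ===== SOURCE B (Python) =====
-- m = 998244353
--
-- def f(x):
--     n = len(x)
--     s = 0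
--     prev = -1
--     for pos in range(n):
--         d = x[pos]
--         cnt = max(d, 0) - (1 if 0 <= prev < d else 0)
--         s += cnt * pow(9, n - pos - 1, m)
--         if d == prev:
--             break
--         prev = d
--     else:
--         s += 1
--     return s % m
-- ===== Notes on version B (the rewrite author's own statement) =====
-- stated objective: faster
-- what changed: Replaces A's recursive backtracking, whose per-digit 'for u in range(x[pos])' loop does O(digit value) work, by a single iterative pass that counts the admissible smaller digits in closed form (max(d,0) minus one if prev falls below d) and uses a for/else to add 1 when x itself is rainbow.
import Mathlib
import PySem

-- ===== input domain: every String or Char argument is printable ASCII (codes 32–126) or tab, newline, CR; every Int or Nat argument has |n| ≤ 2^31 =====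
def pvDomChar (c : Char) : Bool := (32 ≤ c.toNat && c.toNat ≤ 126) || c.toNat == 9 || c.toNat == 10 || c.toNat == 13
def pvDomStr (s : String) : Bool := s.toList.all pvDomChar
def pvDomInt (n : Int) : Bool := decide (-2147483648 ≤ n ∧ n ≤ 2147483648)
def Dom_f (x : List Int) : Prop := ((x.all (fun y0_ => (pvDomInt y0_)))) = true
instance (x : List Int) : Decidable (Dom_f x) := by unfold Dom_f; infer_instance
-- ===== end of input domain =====

-- B replaces A's recursive backtracking (with a per-digit loop over range(x[pos])) by a single
-- iterative pass with a closed-form count per position; objective: faster (no O(digit) inner loop).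

-- ===== PORT A =====
-- pow(9, e, m) for a natural exponent (Python's three-argument pow)
def powMod9 (e : Nat) : Int := ((9 : Int) ^ e) % 998244353

-- bt(pos, prev, tie); fuel = n - pos, so fuel = 0 iff pos == n; x[pos] is the head of the
-- remaining suffix, carried as fuel over the fixed list x (pos = x.length - fuel).
def fBT (x : List Int) (fuel : Nat) (prev : Int) (tie : Bool) : Int :=
  match fuel with
  | 0 => 1
  | Nat.succ fuel' =>
    if tie then powMod9 (Nat.succ fuel')
    else
      let d := x.getD (x.length - Nat.succ fuel') 0
      let s := (PySem.List.pyRange 0 d 1).foldl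
        (fun s u => if u = prev then s else s + fBT x fuel' u true) 0
      let s := if d ≠ prev then s + fBT x fuel' d false else s
      PySem.Int.mod s 998244353

def f (x : List Int) : Int := PySem.Int.mod (fBT x x.length (-1) false) 998244353

-- ===== PORT B =====
-- the for/else loop: structural recursion over the remaining digits; n - pos - 1 = rest.length
def fAltGo (prev s : Int) : List Int → Int
  | [] => (s + 1) % 998244353
  | d :: rest =>
    let cnt := max d 0 - (if 0 ≤ prev ∧ prev < d then 1 else 0)
    let s' := s + cnt * powMod9 rest.length
    if d = prev then s' % 998244353 else fAltGo d s' rest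

def f_alt (x : List Int) : Int := fAltGo (-1) 0 x

-- ===== PRECONDITION & SPEC =====
def Spec_f (x : List Int) (out : Int) : Prop := out = f_alt x
instance (x : List Int) (out : Int) : Decidable (Spec_f x out) := by unfold Spec_f; infer_instance

-- ===== CLAIM (what is proved, stated in full; the proofs are below) =====
def Claim_equal_f : Prop := ∀ (x : List Int), Dom_f x → Spec_f x (f x)

-- ===== LEMMAS AND PROOFS =====

-- a pure list-structured restatement of A's bt with tie = 0 (proof scaffolding only)
def btL : List Int → Int → Int
  | [], _ => 1
  | d :: rest, prev =>
    let s := (PySem.List.pyRange 0 d 1).foldl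
      (fun s u => if u = prev then s else s + powMod9 rest.length) 0
    let s := if d ≠ prev then s + btL rest d else s
    s % 998244353

theorem fBT_tie (x : List Int) (fuel : Nat) (prev : Int) :
    fBT x fuel prev true = powMod9 fuel := by
  cases fuel with
  | zero => simp [fBT, powMod9]
  | succ n => simp [fBT]

theorem getD_of_drop {x : List Int} {k : Nat} {d : Int} {rest : List Int}
    (h : x.drop k = d :: rest) : x.getD k 0 = d := by
  have h1 : x[k]? = some d := by rw [← List.head?_drop, h]; rfl
  rw [List.getD_eq_getElem?_getD, h1]
  rfl

-- pushes one application of Python's per-call mod to the outside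
theorem addmod (a b n : Int) : (a + b % n) % n = (a + b) % n := by
  conv_rhs => rw [Int.add_emod]
  rw [Int.add_emod a (b % n), Int.emod_emod_of_dvd _ dvd_rfl]

theorem fBT_eq_btL (x : List Int) (l : List Int) (prev : Int)
    (h : x.drop (x.length - l.length) = l) (hle : l.length ≤ x.length) :
    fBT x l.length prev false = btL l prev := by
  induction l generalizing prev with
  | nil => simp [fBT, btL]
  | cons d rest ih =>
    have hd : x.getD (x.length - (rest.length + 1)) 0 = d := by
      simpa using getD_of_drop h
    have hrest : x.drop (x.length - rest.length) = rest := by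
      have heq : x.length - rest.length = (x.length - (d :: rest).length) + 1 := by
        simp at hle ⊢; omega
      rw [heq, ← List.drop_drop, h]
      simp
    have hle' : rest.length ≤ x.length := by simp at hle; omega
    show fBT x (rest.length + 1) prev false = btL (d :: rest) prev
    rw [fBT]
    simp only [if_neg (Bool.false_ne_true), hd, fBT_tie, ih d hrest hle']
    rw [PySem.Int.mod_eq_emod_of_pos (show (0:Int) < 998244353 by norm_num)]
    rfl

theorem foldl_count (prev c : Int) (L : List Int) : ∀ s : Int,
    L.foldl (fun s u => if u = prev then s else s + c) s
      = s + ((L.countP (fun u => u ≠ prev) : Int)) * c := by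
  induction L with
  | nil => intro s; simp
  | cons a L ih =>
    intro s
    by_cases h : a = prev
    · simp [List.foldl_cons, h, ih]
    · simp [List.foldl_cons, h, ih]; ring

theorem range_countP (d prev : Int) :
    ((PySem.List.pyRange 0 d 1).countP (fun u => u ≠ prev) : Int)
      = max d 0 - (if 0 ≤ prev ∧ prev < d then 1 else 0) := by
  have hnd := PySem.List.nodup_pyRange_one (a := 0) (b := d)
  have hlen : (PySem.List.pyRange 0 d 1).length = d.toNat := by
    rw [PySem.List.length_pyRange_one]; norm_num
  have hcnt : (PySem.List.pyRange 0 d 1).countP (fun u => u = prev)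
      = if 0 ≤ prev ∧ prev < d then 1 else 0 := by
    by_cases hmem : prev ∈ PySem.List.pyRange 0 d 1
    · have h1 : (PySem.List.pyRange 0 d 1).count prev = 1 :=
        List.count_eq_one_of_mem hnd hmem
      have hiff := (PySem.List.mem_pyRange_one (a := 0) (b := d) (x := prev)).mp hmem
      rw [if_pos hiff]
      have hfun : (fun u : Int => decide (u = prev)) = (fun u : Int => u == prev) := by
        funext u; exact (beq_eq_decide u prev).symm
      rw [hfun]
      simpa [List.count] using h1
    · have hiff : ¬ (0 ≤ prev ∧ prev < d) := fun hp =>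
        hmem ((PySem.List.mem_pyRange_one).mpr hp)
      rw [if_neg hiff, List.countP_eq_zero]
      intro a ha
      simp only [decide_eq_true_eq]
      intro he; exact hmem (he ▸ ha)
  have hNat : (PySem.List.pyRange 0 d 1).countP (fun u => u ≠ prev)
      + (PySem.List.pyRange 0 d 1).countP (fun u => u = prev) = d.toNat := by
    rw [← hlen, List.length_eq_countP_add_countP (fun u : Int => decide (u ≠ prev))]
    congr 1
    apply List.countP_congr
    intro a _
    simp
  rw [hcnt] at hNat
  by_cases hp : 0 ≤ prev ∧ prev < d
  · rw [if_pos hp] at hNat; rw [if_pos hp]; omega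
  · rw [if_neg hp] at hNat; rw [if_neg hp]
    have : prev ∉ PySem.List.pyRange 0 d 1 := fun hm =>
      hp ((PySem.List.mem_pyRange_one).mp hm)
    omega

theorem fAltGo_eq (l : List Int) : ∀ (prev s : Int),
    fAltGo prev s l = (s + btL l prev) % 998244353 := by
  induction l with
  | nil => intro prev s; simp [fAltGo, btL]
  | cons d rest ih =>
    intro prev s
    have hcount : (PySem.List.pyRange 0 d 1).foldl
        (fun s u => if u = prev then s else s + powMod9 rest.length) 0
        = (max d 0 - (if 0 ≤ prev ∧ prev < d then 1 else 0)) * powMod9 rest.length := by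
      rw [foldl_count, range_countP]; ring
    by_cases hd : d = prev
    · simp only [fAltGo, btL, if_pos hd, if_neg (by simp [hd] : ¬ d ≠ prev), hcount]
      rw [addmod]
    · simp only [fAltGo, btL, if_neg hd, if_pos (Ne.intro hd), hcount, ih]
      rw [addmod, ← add_assoc]

-- ===== VERDICT (by name: the statement is the Claim_ definition above) =====
theorem f_spec : Claim_equal_f := by
  intro x _
  show f x = f_alt x
  unfold f f_alt
  rw [PySem.Int.mod_eq_emod_of_pos (by norm_num),
    fBT_eq_btL x x (-1) (by simp) (le_refl _), fAltGo_eq]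
  simp
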